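-- pv_equiv track=rewrite | github.com/pedroivofreis/report_humana | api-main/api-main/scripts/seed_database.py | _generate_valid_cpf
-- ===== SOURCE A (Python) =====
-- def _generate_valid_cpf(seq: int) -> str:
--     """Generate a valid CPF from a sequence number."""
--     base = f"{seq:09d}"
--
--     sum1 = sum(int(base[i]) * (10 - i) for i in range(9))
--     digit1 = (sum1 * 10) % 11
--     if digit1 == 10:
--         digit1 = 0
--
--     base_with_digit1 = base + str(digit1)
--     sum2 = sum(int(base_with_digit1[i]) * (11 - i) for i in range(10))
--     digit2 = (sum2 * 10) % 11
--     if digit2 == 10: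
--         digit2 = 0
--
--     return base + str(digit1) + str(digit2)
-- ===== SOURCE B (Python) =====
-- def _generate_valid_cpf(seq: int) -> str:
--     """Generate a valid CPF from a sequence number in one checksum pass."""
--     base = str(seq).zfill(9)
--     weighted = 0  # sum of digit * (10 - position) over the nine base digits
--     plain = 0     # plain sum of the nine base digits
--     for i, c in enumerate(base[:9]):
--         d = int(c)
--         weighted += d * (10 - i)
--         plain += d
--     digit1 = (weighted * 10) % 11 % 10
--     # second weighted sum = weighted + plain + 2 * digit1, so no second scan
--     digit2 = ((weighted + plain + 2 * digit1) * 10) % 11 % 10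
--     return base + str(digit1) + str(digit2)
-- ===== Notes on version B (the rewrite author's own statement) =====
-- stated objective: alternative
-- what changed: B makes a single accumulating pass over the base digits (weighted sum plus plain digit sum) and derives the second CPF checksum arithmetically (sum2 = sum1 + digitsum + 2*digit1) instead of A's second full scan re-parsing every character of base+digit1; Pre_ excludes negative seq (both programs raise ValueError) and seq of more than nine decimal digits, where the padded base overflows the CPF window, no valid CPF exists, and A's ten-character checksum window and B's nine-digit checksum are equally defensible readings of an unspecified corner.
-- outside the precondition, e.g. on _generate_valid_cpf(1000000007): A returns '100000000718', B returns '100000000719'; on _generate_valid_cpf(-1): A raises ValueError, B raises ValueError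
import Mathlib
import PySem

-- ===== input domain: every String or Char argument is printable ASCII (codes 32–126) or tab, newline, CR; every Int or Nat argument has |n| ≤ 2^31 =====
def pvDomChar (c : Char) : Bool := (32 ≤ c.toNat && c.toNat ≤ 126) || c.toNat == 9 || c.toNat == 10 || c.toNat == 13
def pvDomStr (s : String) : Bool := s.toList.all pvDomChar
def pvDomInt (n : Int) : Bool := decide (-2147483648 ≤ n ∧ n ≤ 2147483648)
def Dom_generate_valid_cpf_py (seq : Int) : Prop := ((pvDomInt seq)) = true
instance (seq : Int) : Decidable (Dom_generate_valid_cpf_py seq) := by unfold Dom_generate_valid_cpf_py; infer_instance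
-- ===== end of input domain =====

-- B makes one accumulating pass over the nine base digits and derives the
-- second CPF checksum arithmetically (sum2 = sum1 + digitsum + 2*digit1)
-- instead of A's second full scan re-parsing base+digit1; same cost class.


-- ===== PORT A =====
-- int(base[i]) for one character: pyGetD/getD 0 totalize the IndexError/ValueError
-- cases, which never occur under Pre_ (0 ≤ seq gives an all-digit string of length ≥ 9)
def pvIntAt (cs : List Char) (i : Int) : Int :=
  (PySem.Int.ofChars? [PySem.List.pyGetD cs i ' ']).getD 0

def generate_valid_cpf_py (seq : Int) : String :=
  -- f"{seq:09d}" = str(seq) left-padded with '0' to width 9 (exact, sign kept in front)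
  let base : List Char := PySem.Chars.zfill (PySem.Int.toChars seq) 9
  let sum1 := (PySem.List.pyRange 0 9 1).foldl (fun acc i => acc + pvIntAt base i * (10 - i)) 0
  let m1 := PySem.Int.mod (sum1 * 10) 11
  let digit1 := if m1 = 10 then 0 else m1
  let base_with_digit1 := base ++ PySem.Int.toChars digit1
  let sum2 := (PySem.List.pyRange 0 10 1).foldl (fun acc i => acc + pvIntAt base_with_digit1 i * (11 - i)) 0
  let m2 := PySem.Int.mod (sum2 * 10) 11
  let digit2 := if m2 = 10 then 0 else m2
  String.mk (base ++ PySem.Int.toChars digit1 ++ PySem.Int.toChars digit2)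

-- ===== PORT B =====
-- int(c) for one character; getD 0 totalizes ValueError (never hit under Pre_)
def pvIntOfChar (c : Char) : Int := (PySem.Int.ofChars? [c]).getD 0

def generate_valid_cpf_py_alt (seq : Int) : String :=
  let base : List Char := PySem.Chars.zfill (PySem.Int.toChars seq) 9  -- str(seq).zfill(9)
  -- for i, c in enumerate(base[:9]): d = int(c); weighted += d*(10-i); plain += d
  let p := (PySem.List.enumerate (base.take 9)).foldl
      (fun (p : Int × Int) (ic : Int × Char) =>
        (p.1 + pvIntOfChar ic.2 * (10 - ic.1), p.2 + pvIntOfChar ic.2)) (0, 0)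
  let digit1 := PySem.Int.mod (PySem.Int.mod (p.1 * 10) 11) 10
  let digit2 := PySem.Int.mod (PySem.Int.mod ((p.1 + p.2 + 2 * digit1) * 10) 11) 10
  String.mk (base ++ PySem.Int.toChars digit1 ++ PySem.Int.toChars digit2)

-- ===== PRECONDITION & SPEC =====
-- Pre_ excludes negative seq, where Python A raises ValueError (int('-') on the sign
-- character of the padded string; B raises there too), and seq of more than nine decimal
-- digits, where the padded base overflows the CPF window: no valid CPF exists for such a
-- sequence, and A's ten-character checksum window and B's nine-digit checksum are equally
-- defensible readings of an unspecified corner.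
def Pre_generate_valid_cpf_py (seq : Int) : Prop := 0 ≤ seq ∧ seq < 1000000000
instance (seq : Int) : Decidable (Pre_generate_valid_cpf_py seq) := by unfold Pre_generate_valid_cpf_py; infer_instance
def pvWitness_generate_valid_cpf_py : Int := (7)

def Spec_generate_valid_cpf_py (seq : Int) (out : String) : Prop := out = generate_valid_cpf_py_alt seq
instance (seq : Int) (out : String) : Decidable (Spec_generate_valid_cpf_py seq out) := by unfold Spec_generate_valid_cpf_py; infer_instance

-- ===== CLAIM (what is proved, stated in full; the proofs are below) =====
def Claim_equal_generate_valid_cpf_py : Prop := ∀ (seq : Int), Dom_generate_valid_cpf_py seq → Pre_generate_valid_cpf_py seq → Spec_generate_valid_cpf_py seq (generate_valid_cpf_py seq)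

-- ===== LEMMAS AND PROOFS =====

-- A's 10→0 remap of a mod-11 value is B's extra mod 10
lemma mod11_remap (x : Int) :
    (if PySem.Int.mod x 11 = 10 then 0 else PySem.Int.mod x 11)
      = PySem.Int.mod (PySem.Int.mod x 11) 10 := by
  have h0 : 0 ≤ PySem.Int.mod x 11 := PySem.Int.mod_nonneg x (by norm_num)
  have h1 : PySem.Int.mod x 11 < 11 := PySem.Int.mod_lt x (by norm_num)
  interval_cases (PySem.Int.mod x 11) <;> decide

-- str(d) for 0 ≤ d ≤ 9 is one digit character that parses back to d
lemma intAt_toChars (d : Int) (h0 : 0 ≤ d) (h1 : d < 10) :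
    pvIntOfChar ((PySem.Int.toChars d).getD 0 ' ') = d := by
  unfold pvIntOfChar
  interval_cases d <;> decide

-- str(d%10) parses back to d%10, as one character
lemma pvIntOfChar_toChars_mod (x : Int) :
    pvIntOfChar ((PySem.Int.toChars (PySem.Int.mod x 10)).getD 0 ' ') = PySem.Int.mod x 10 :=
  intAt_toChars _ (PySem.Int.mod_nonneg x (by norm_num)) (PySem.Int.mod_lt x (by norm_num))

-- a list of length 9 is nine explicit characters
lemma exists_nine_exact {cs : List Char} (h : cs.length = 9) :
    ∃ a0 a1 a2 a3 a4 a5 a6 a7 a8,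
      cs = [a0, a1, a2, a3, a4, a5, a6, a7, a8] := by
  rcases cs with _|⟨a0,_|⟨a1,_|⟨a2,_|⟨a3,_|⟨a4,_|⟨a5,_|⟨a6,_|⟨a7,_|⟨a8,t⟩⟩⟩⟩⟩⟩⟩⟩⟩
  all_goals simp only [List.length_cons, List.length_nil] at h
  all_goals try omega
  have ht : t = [] := List.length_eq_zero_iff.mp (by omega)
  exact ⟨a0, a1, a2, a3, a4, a5, a6, a7, a8, by rw [ht]⟩

-- nine leading weighted per-index parses of A's first sum, written out
lemma sumA9 (a0 a1 a2 a3 a4 a5 a6 a7 a8 : Char) (t : List Char) :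
    List.foldl (fun acc i => acc +
        (PySem.Int.ofChars? [PySem.List.pyGetD (a0::a1::a2::a3::a4::a5::a6::a7::a8::t) i ' ']).getD 0 * (10 - i))
      0 (PySem.List.pyRange 0 9)
    = pvIntOfChar a0*10 + pvIntOfChar a1*9 + pvIntOfChar a2*8 + pvIntOfChar a3*7 + pvIntOfChar a4*6
      + pvIntOfChar a5*5 + pvIntOfChar a6*4 + pvIntOfChar a7*3 + pvIntOfChar a8*2 := by
  rw [show PySem.List.pyRange 0 9 = [0,1,2,3,4,5,6,7,8] from rfl]
  simp only [List.foldl, PySem.List.pyGetD_ofNat']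
  norm_num [List.getD, pvIntOfChar]

-- A's second sum over the ten leading characters of base ++ str(digit1)
lemma sumA10 (a0 a1 a2 a3 a4 a5 a6 a7 a8 : Char) (r : List Char) :
    List.foldl (fun acc i => acc +
        (PySem.Int.ofChars? [PySem.List.pyGetD (a0::a1::a2::a3::a4::a5::a6::a7::a8::r) i ' ']).getD 0 * (11 - i))
      0 (PySem.List.pyRange 0 10)
    = pvIntOfChar a0*11 + pvIntOfChar a1*10 + pvIntOfChar a2*9 + pvIntOfChar a3*8 + pvIntOfChar a4*7
      + pvIntOfChar a5*6 + pvIntOfChar a6*5 + pvIntOfChar a7*4 + pvIntOfChar a8*3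
      + pvIntOfChar (r.getD 0 ' ')*2 := by
  rw [show PySem.List.pyRange 0 10 = [0,1,2,3,4,5,6,7,8,9] from rfl]
  simp only [List.foldl, PySem.List.pyGetD_ofNat']
  norm_num [List.getD, pvIntOfChar]

-- B's single pass over the nine base characters, written out
lemma sumB9 (a0 a1 a2 a3 a4 a5 a6 a7 a8 : Char) :
    (PySem.List.enumerate [a0,a1,a2,a3,a4,a5,a6,a7,a8]).foldl
        (fun (p : Int × Int) (ic : Int × Char) =>
          (p.1 + pvIntOfChar ic.2 * (10 - ic.1), p.2 + pvIntOfChar ic.2)) (0, 0)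
    = (pvIntOfChar a0*10 + pvIntOfChar a1*9 + pvIntOfChar a2*8 + pvIntOfChar a3*7 + pvIntOfChar a4*6
        + pvIntOfChar a5*5 + pvIntOfChar a6*4 + pvIntOfChar a7*3 + pvIntOfChar a8*2,
       pvIntOfChar a0 + pvIntOfChar a1 + pvIntOfChar a2 + pvIntOfChar a3 + pvIntOfChar a4
        + pvIntOfChar a5 + pvIntOfChar a6 + pvIntOfChar a7 + pvIntOfChar a8) := by
  simp only [PySem.List.enumerate_cons, PySem.List.enumerate_nil, List.foldl]
  norm_num

-- under 0 ≤ seq < 10^9 the padded base is exactly nine characters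
lemma base_len_nine (seq : Int) (h0 : 0 ≤ seq) (h1 : seq < 1000000000) :
    (PySem.Chars.zfill (PySem.Int.toChars seq) 9).length = 9 := by
  have hn : seq.toNat < 10 ^ 9 := by
    have : seq.toNat < 1000000000 := by omega
    simpa using this
  have hlen : (PySem.Int.toChars seq).length ≤ 9 := by
    simp only [PySem.Int.toChars, if_neg (not_lt.mpr h0)]
    exact Nat.toDigits_length 10 seq.toNat 9 (by norm_num) hn
  rw [PySem.Chars.length_zfill]
  omega

-- ===== VERDICT (by name: the statement is the Claim_ definition above) =====
theorem generate_valid_cpf_py_spec : Claim_equal_generate_valid_cpf_py := by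
  intro seq _ hpre
  obtain ⟨hpre, hlt⟩ := hpre
  unfold Spec_generate_valid_cpf_py generate_valid_cpf_py generate_valid_cpf_py_alt
  obtain ⟨a0, a1, a2, a3, a4, a5, a6, a7, a8, hb⟩ :=
    exists_nine_exact (base_len_nine seq hpre hlt)
  rw [hb]
  simp only [pvIntAt, List.cons_append, List.nil_append,
    show ∀ (c0 c1 c2 c3 c4 c5 c6 c7 c8 : Char),
      ([c0,c1,c2,c3,c4,c5,c6,c7,c8] : List Char).take 9 = [c0,c1,c2,c3,c4,c5,c6,c7,c8] from
      fun _ _ _ _ _ _ _ _ _ => rfl]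
  rw [sumA9, sumA10, sumB9, mod11_remap, mod11_remap]
  simp only [pvIntOfChar_toChars_mod]
  · congr 1
    simp only [List.cons.injEq, true_and, List.append_cancel_left_eq]
    congr 3
    ring
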